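-- pv_equiv track=rewrite | github.com/victorbouissoumota/EP2---mota-e-sheik | funcoes.py | calcula_pontos_quina
-- ===== SOURCE A (Python) =====
-- def calcula_pontos_quina(dados):
--     contagem = {}
--     for d in dados:
--         if d in contagem:
--             contagem[d] += 1
--         else:
--             contagem[d] = 1
--
--     for valor in contagem:
--         if contagem[valor] >= 5:
--             return 50
--
--     return 0
-- ===== SOURCE B (Python) =====
-- def calcula_pontos_quina(dados):
--     s = sorted(dados)
--     for i in range(4, len(s)):
--         if s[i] == s[i - 4]:
--             return 50
--     return 0
-- ===== Notes on version B (the rewrite author's own statement) =====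
-- stated objective: alternative
-- what changed: Replaces A's hash-count-then-scan with sort-then-sliding-window: after sorting, some value occurs >= 5 times iff an element equals the one four positions earlier.
import Mathlib
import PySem

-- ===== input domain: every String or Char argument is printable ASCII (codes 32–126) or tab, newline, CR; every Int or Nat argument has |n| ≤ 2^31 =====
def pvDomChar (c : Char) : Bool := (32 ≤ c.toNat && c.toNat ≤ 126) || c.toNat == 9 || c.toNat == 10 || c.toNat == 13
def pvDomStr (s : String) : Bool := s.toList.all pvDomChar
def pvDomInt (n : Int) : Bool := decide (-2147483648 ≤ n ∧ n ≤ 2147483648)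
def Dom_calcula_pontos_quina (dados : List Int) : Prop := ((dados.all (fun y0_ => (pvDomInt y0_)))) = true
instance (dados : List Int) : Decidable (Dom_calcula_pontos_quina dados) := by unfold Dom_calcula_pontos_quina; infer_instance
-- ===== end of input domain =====

-- B replaces A's count-dict-then-scan with sort-then-sliding-window (in the sorted list, an
-- element equal to the one four positions earlier marks a value occurring ≥ 5 times);
-- objective: alternative algorithm of comparable cost, not claimed faster.

-- ===== PORT A =====
def calcula_pontos_quina (dados : List Int) : Int :=
  let contagem := dados.foldl
    (fun contagem d =>
      if contagem.contains d then contagem.modify d 0 (· + 1) else contagem.insert d 1)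
    (PySem.Dict.empty : PySem.Dict Int Int)
  match contagem.keys.find? (fun valor => decide ((5 : Int) ≤ contagem.getD valor 0)) with
  | some _ => 50
  | none => 0

-- ===== PORT B =====
-- s[i] / s[i-4] via pyGet?: exact, since every i drawn from range(4, len(s)) is in range.
def calcula_pontos_quina_alt (dados : List Int) : Int :=
  let s := PySem.List.sorted dados (fun x => x) false
  match (PySem.List.pyRange 4 (s.length : Int) 1).find?
      (fun i => PySem.List.pyGet? s i == PySem.List.pyGet? s (i - 4)) with
  | some _ => 50
  | none => 0

-- ===== PRECONDITION & SPEC =====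
def Spec_calcula_pontos_quina (dados : List Int) (out : Int) : Prop := out = calcula_pontos_quina_alt dados
instance (dados : List Int) (out : Int) : Decidable (Spec_calcula_pontos_quina dados out) := by unfold Spec_calcula_pontos_quina; infer_instance

-- ===== CLAIM (what is proved, stated in full; the proofs are below) =====
def Claim_equal_calcula_pontos_quina : Prop := ∀ (dados : List Int), Dom_calcula_pontos_quina dados → Spec_calcula_pontos_quina dados (calcula_pontos_quina dados)

-- ===== LEMMAS AND PROOFS =====

-- A's per-element dict update is exactly the Counter update.
theorem pv_step_eq (c : PySem.Dict Int Int) (d : Int) :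
    (if c.contains d then c.modify d 0 (· + 1) else c.insert d 1) = c.modify d 0 (· + 1) := by
  by_cases h : c.contains d = true
  · simp [h]
  · simp only [h, Bool.false_eq_true, if_false, PySem.Dict.modify]
    congr 1
    have hn : List.find? (fun p => p.1 == d) c.items = none := by
      rw [List.find?_eq_none]
      intro p hp hpd
      exact h (List.any_eq_true.mpr ⟨p, hp, hpd⟩)
    simp [PySem.Dict.getD, PySem.Dict.get?, hn]

-- A returns 50 iff some element of dados occurs at least 5 times, else 0.
theorem pv_A_char (dados : List Int) :
    calcula_pontos_quina dados
      = if dados.any (fun x => decide (5 ≤ dados.count x)) then 50 else 0 := by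
  unfold calcula_pontos_quina
  have hfold : dados.foldl
      (fun contagem d =>
        if contagem.contains d then contagem.modify d 0 (· + 1) else contagem.insert d 1)
      (PySem.Dict.empty : PySem.Dict Int Int) = PySem.Dict.counter dados := by
    rw [PySem.Dict.counter_eq_foldl]
    congr 1
    funext c d
    exact pv_step_eq c d
  simp only [hfold]
  cases hf : (PySem.Dict.counter dados).keys.find?
      (fun valor => decide ((5 : Int) ≤ (PySem.Dict.counter dados).getD valor 0)) with
  | some v =>
      have hm := List.mem_of_find?_eq_some hf
      have hp := List.find?_some hf
      rw [PySem.Dict.keys_counter, PySem.Set.mem_ofList] at hm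
      rw [PySem.Dict.getD_counter, decide_eq_true_iff] at hp
      rw [if_pos]
      exact List.any_eq_true.mpr ⟨v, hm, by rw [decide_eq_true_iff]; exact_mod_cast hp⟩
  | none =>
      rw [if_neg]
      intro hany
      obtain ⟨x, hx, hdec⟩ := List.any_eq_true.mp hany
      rw [decide_eq_true_iff] at hdec
      have hk : x ∈ (PySem.Dict.counter dados).keys := by
        rw [PySem.Dict.keys_counter, PySem.Set.mem_ofList]; exact hx
      have hnot := List.find?_eq_none.mp hf x hk
      rw [decide_eq_true_iff, PySem.Dict.getD_counter] at hnot
      exact hnot (by exact_mod_cast hdec)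

-- A run of five equal entries in a ≤-sorted list gives a count ≥ 5.
theorem pv_run_to_count (s : List Int) (hs : s.Pairwise (· ≤ ·)) (j : ℕ)
    (h : j + 4 < s.length) (he : s[j + 4] = s[j]) : 5 ≤ s.count s[j] := by
  have hmono := List.pairwise_iff_getElem.mp hs
  have hall : ∀ k, ∀ _hk4 : k ≤ 4, s[j + k]'(by omega) = s[j] := by
    intro k hk
    rcases Nat.eq_zero_or_pos k with rfl | hkpos
    · simp
    · have h1 : s[j] ≤ s[j + k]'(by omega) := hmono j (j + k) (by omega) (by omega) (by omega)
      have h2 : s[j + k]'(by omega) ≤ s[j + 4] := by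
        rcases Nat.lt_or_ge (j + k) (j + 4) with hlt | hge
        · exact hmono (j + k) (j + 4) (by omega) h hlt
        · have hke : k = 4 := by omega
          subst hke; exact le_rfl
      omega
  have hrep : (s.drop j).take 5 = List.replicate 5 s[j] := by
    apply List.ext_getElem
    · simp; omega
    · intro k hk1 hk2
      simp only [List.getElem_take, List.getElem_drop, List.getElem_replicate]
      have hk5 : k < 5 := by simp at hk2; omega
      exact hall k (by omega)
  set x := s[j] with hx
  have h1 : s.count x = (s.take j).count x + (s.drop j).count x := by
    conv_lhs => rw [← List.take_append_drop j s]
    rw [List.count_append]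
  have h2 : (s.drop j).count x
      = ((s.drop j).take 5).count x + ((s.drop j).drop 5).count x := by
    conv_lhs => rw [← List.take_append_drop 5 (s.drop j)]
    rw [List.count_append]
  rw [hrep] at h2
  simp at h2
  omega

-- Five equal entries sit contiguously in F ++ replicate c x ++ G when c ≥ 5.
theorem pv_run_in_decomp (F G : List Int) (x : Int) (c : Nat) (hc : 5 ≤ c) :
    ∃ j, j + 4 < (F ++ (List.replicate c x ++ G)).length ∧
      (F ++ (List.replicate c x ++ G))[j + 4]? = (F ++ (List.replicate c x ++ G))[j]? := by
  have e : ∀ k : Nat, k < c → (F ++ (List.replicate c x ++ G))[F.length + k]? = some x := by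
    intro k hk
    rw [List.getElem?_append_right (by omega), show F.length + k - F.length = k by omega,
      List.getElem?_append_left (by rw [List.length_replicate]; omega), List.getElem?_replicate,
      if_pos hk]
  have e0 := e 0 (by omega)
  rw [Nat.add_zero] at e0
  refine ⟨F.length, by simp [List.length_append, List.length_replicate]; omega, ?_⟩
  rw [e 4 (by omega), e0]

-- A count ≥ 5 in a ≤-sorted list gives a run of five equal entries.
theorem pv_count_to_run (s : List Int) (hs : s.Pairwise (· ≤ ·)) (x : Int)
    (hc : 5 ≤ s.count x) :
    ∃ j, j + 4 < s.length ∧ s[j + 4]? = s[j]? := by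
  have hdec : s = s.filter (fun a => decide (a < x))
      ++ (List.replicate (s.count x) x ++ s.filter (fun a => decide (x < a))) := by
    have hperm1 := List.filter_append_perm (fun a => decide (a < x)) s
    have hperm2 := List.filter_append_perm (fun a => a == x)
        (s.filter (fun a => !decide (a < x)))
    have hbeq : (s.filter (fun a => !decide (a < x))).filter (fun a => a == x)
        = List.replicate (s.count x) x := by
      rw [List.filter_beq x, List.count_filter (by simp)]
    have hgt : (s.filter (fun a => !decide (a < x))).filter (fun a => !(a == x))
        = s.filter (fun a => decide (x < a)) := by
      rw [List.filter_filter]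
      apply List.filter_congr
      intro a _
      by_cases h2 : a = x
      · subst h2; simp
      · by_cases h1 : a < x
        · have h3 : ¬ x < a := by omega
          simp [h1, h3]
        · have h3 : x < a := by omega
          simp [h1, h2, h3]
    rw [hbeq, hgt] at hperm2
    have hperm : (s.filter (fun a => decide (a < x))
        ++ (List.replicate (s.count x) x ++ s.filter (fun a => decide (x < a)))).Perm s :=
      ((hperm2.append_left (s.filter (fun a => decide (a < x)))).trans hperm1)
    have hpw : (s.filter (fun a => decide (a < x))
        ++ (List.replicate (s.count x) x ++ s.filter (fun a => decide (x < a)))).Pairwise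
          (· ≤ ·) := by
      rw [List.pairwise_append, List.pairwise_append]
      refine ⟨List.Pairwise.sublist List.filter_sublist hs,
        ⟨List.pairwise_replicate.mpr (Or.inr le_rfl),
         List.Pairwise.sublist List.filter_sublist hs, ?_⟩, ?_⟩
      · intro a ha b hb
        rw [List.mem_replicate] at ha
        rw [List.mem_filter] at hb
        simp at hb
        omega
      · intro a ha b hb
        rw [List.mem_filter] at ha
        simp at ha
        rcases List.mem_append.mp hb with hb | hb
        · rw [List.mem_replicate] at hb
          omega
        · rw [List.mem_filter] at hb
          simp at hb
          omega
    exact (List.Perm.eq_of_pairwise (fun a b _ _ h1 h2 => le_antisymm h1 h2) hpw hs hperm).symm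
  rw [hdec]
  exact pv_run_in_decomp _ _ _ _ hc

-- B's window search succeeds iff some value has count ≥ 5 (for a ≤-sorted list).
theorem pv_B_core (s : List Int) (hpw : s.Pairwise (· ≤ ·)) :
    ((PySem.List.pyRange 4 (s.length : Int) 1).find?
        (fun i => PySem.List.pyGet? s i == PySem.List.pyGet? s (i - 4))).isSome = true
      ↔ ∃ x : Int, 5 ≤ s.count x := by
  rw [List.find?_isSome]
  constructor
  · rintro ⟨i, hm, hp⟩
    rw [PySem.List.mem_pyRange_iff_of_pos (by norm_num)] at hm
    obtain ⟨h4, hlt, -⟩ := hm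
    have hni : ((i.toNat : ℤ)) = i := Int.toNat_of_nonneg (by omega)
    have hn4 : ((i.toNat : ℤ)) - 4 = (((i.toNat - 4 : ℕ)) : ℤ) := by omega
    rw [← hni, hn4, PySem.List.pyGet?_natCast, PySem.List.pyGet?_natCast] at hp
    have hnlen : i.toNat < s.length := by omega
    have hj4 : i.toNat - 4 + 4 = i.toNat := by omega
    rw [List.getElem?_eq_getElem hnlen, List.getElem?_eq_getElem (by omega),
      beq_iff_eq, Option.some_inj] at hp
    exact ⟨_, pv_run_to_count s hpw (i.toNat - 4) (by omega)
      (by simp only [hj4]; exact hp)⟩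
  · rintro ⟨x, hx⟩
    obtain ⟨j, hj, hje⟩ := pv_count_to_run s hpw x hx
    refine ⟨((j + 4 : ℕ) : ℤ), ?_, ?_⟩
    · rw [PySem.List.mem_pyRange_iff_of_pos (by norm_num)]
      refine ⟨by omega, by omega, one_dvd _⟩
    · have h4 : (((j + 4 : ℕ)) : ℤ) - 4 = ((j : ℕ) : ℤ) := by push_cast; ring
      rw [h4, PySem.List.pyGet?_natCast, PySem.List.pyGet?_natCast, hje, beq_self_eq_true]

-- B returns 50 iff some element of dados occurs at least 5 times, else 0.
theorem pv_B_char (dados : List Int) :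
    calcula_pontos_quina_alt dados
      = if dados.any (fun x => decide (5 ≤ dados.count x)) then 50 else 0 := by
  have hperm : (PySem.List.sorted dados (fun x => x) false).Perm dados :=
    PySem.List.sorted_perm dados (fun x => x) false
  have hpw : (PySem.List.sorted dados (fun x => x) false).Pairwise (· ≤ ·) :=
    PySem.List.sorted_pairwise dados (fun x => x)
  have hcore := pv_B_core (PySem.List.sorted dados (fun x => x) false) hpw
  have hany : (dados.any fun x => decide (5 ≤ dados.count x)) = true
      ↔ ∃ x : Int, 5 ≤ (PySem.List.sorted dados (fun x => x) false).count x := by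
    constructor
    · rintro h
      obtain ⟨x, hx, hdec⟩ := List.any_eq_true.mp h
      rw [decide_eq_true_iff] at hdec
      exact ⟨x, by rw [hperm.count_eq]; exact hdec⟩
    · rintro ⟨x, hx⟩
      have hmem : x ∈ dados := hperm.subset (List.count_pos_iff.mp (by omega))
      exact List.any_eq_true.mpr ⟨x, hmem, by
        rw [decide_eq_true_iff, ← hperm.count_eq]; exact hx⟩
  simp only [calcula_pontos_quina_alt]
  cases hf : (PySem.List.pyRange 4 ((PySem.List.sorted dados (fun x => x) false).length : Int) 1).find?
      (fun i => PySem.List.pyGet? (PySem.List.sorted dados (fun x => x) false) i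
        == PySem.List.pyGet? (PySem.List.sorted dados (fun x => x) false) (i - 4)) with
  | some i =>
      rw [if_pos (hany.mpr (hcore.mp (by rw [hf]; rfl)))]
  | none =>
      have hfalse : ¬ (dados.any fun x => decide (5 ≤ dados.count x)) = true := by
        intro h
        have hsome := hcore.mpr (hany.mp h)
        rw [hf] at hsome
        exact Bool.false_ne_true hsome
      rw [if_neg hfalse]

-- ===== VERDICT (by name: the statement is the Claim_ definition above) =====
theorem calcula_pontos_quina_spec : Claim_equal_calcula_pontos_quina := by
  intro dados _
  unfold Spec_calcula_pontos_quina
  rw [pv_A_char, pv_B_char]
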